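-- pv_equiv track=rewrite | github.com/eddielyc/Augmented-Geometric-Distillation | reid/utils/data/dataset.py | non_overlapping
-- ===== SOURCE A (Python) =====
-- def non_overlapping(dataset2ids):
--     id_pool = []
--     mapping = {}
--     for dataset, ids in dataset2ids.items():
--         mapping[dataset] = {}
--         for identity in ids:
--             mapping[dataset][identity] = len(id_pool)
--             id_pool.append(identity)
--     return mapping
-- ===== SOURCE B (Python) =====
-- def non_overlapping(dataset2ids):
--     # Two-pass decomposition: first an offset table (prefix sums of sizes),
--     # then each dataset's mapping is built independently from its offset.
--     items = list(dataset2ids.items())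
--     offsets = []
--     total = 0
--     for _, ids in items:
--         offsets.append(total)
--         total += len(ids)
--     return {dataset: {identity: i for i, identity in enumerate(ids, off)}
--             for (dataset, ids), off in zip(items, offsets)}
-- ===== Notes on version B (the rewrite author's own statement) =====
-- stated objective: alternative
-- what changed: A threads one global counter (len(id_pool)) through a single interleaved pass; B first builds a prefix-sum offset table over the dataset sizes and then builds each dataset's mapping independently with enumerate(ids, offset).
import Mathlib
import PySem

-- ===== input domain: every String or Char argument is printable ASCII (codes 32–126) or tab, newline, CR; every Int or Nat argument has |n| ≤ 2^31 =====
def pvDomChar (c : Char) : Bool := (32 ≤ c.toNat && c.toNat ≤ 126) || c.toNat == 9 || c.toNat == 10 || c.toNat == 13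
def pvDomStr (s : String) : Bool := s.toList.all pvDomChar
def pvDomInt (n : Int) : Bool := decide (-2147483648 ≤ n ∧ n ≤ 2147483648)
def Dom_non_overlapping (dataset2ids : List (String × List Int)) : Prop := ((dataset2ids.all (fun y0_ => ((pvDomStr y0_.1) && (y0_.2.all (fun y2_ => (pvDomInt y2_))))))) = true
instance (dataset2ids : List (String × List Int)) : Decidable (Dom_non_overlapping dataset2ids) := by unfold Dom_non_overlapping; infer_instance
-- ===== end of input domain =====

-- B replaces A's single counter-threading pass by an offset table (prefix sums of the
-- sizes) followed by independent per-dataset enumerate-based assignments (objective: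
-- alternative decomposition, same cost).

-- ===== PORT A =====
-- A mutates the nested dict bound to mapping[dataset] in place; ported by building that
-- inner dict and inserting it under the key (same value, same key position).
def non_overlapping (dataset2ids : List (String × List Int)) : List (String × List (Int × Int)) :=
  let st := dataset2ids.foldl
    (fun (st : List Int × PySem.Dict String (PySem.Dict Int Int)) p =>
      let q := p.2.foldl
        (fun (q : List Int × PySem.Dict Int Int) identity =>
          (q.1 ++ [identity], q.2.insert identity ((q.1.length : Int))))
        (st.1, PySem.Dict.empty)
      (q.1, st.2.insert p.1 q.2))
    ([], PySem.Dict.empty)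
  st.2.items.map (fun p => (p.1, p.2.items))

-- ===== PORT B =====
def non_overlapping_alt (dataset2ids : List (String × List Int)) : List (String × List (Int × Int)) :=
  let offsets := (dataset2ids.foldl
    (fun (st : List Int × Int) p => (st.1 ++ [st.2], st.2 + (p.2.length : Int)))
    ([], 0)).1
  (dataset2ids.zip offsets).map (fun q =>
    (q.1.1, ((PySem.List.enumerate q.1.2 q.2).foldl
        (fun (m : PySem.Dict Int Int) iv => m.insert iv.2 iv.1) PySem.Dict.empty).items))

-- ===== PRECONDITION & SPEC =====
-- Pre_ excludes association lists with duplicate dataset keys: such a list cannot arise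
-- from a Python dict (dict construction collapses duplicates), so its meaning under the
-- dict-as-assoc-list convention is ambiguous and neither port's reading is specified.
def Pre_non_overlapping (dataset2ids : List (String × List Int)) : Prop :=
  (dataset2ids.map Prod.fst).Nodup
instance (dataset2ids : List (String × List Int)) : Decidable (Pre_non_overlapping dataset2ids) := by unfold Pre_non_overlapping; infer_instance
def pvWitness_non_overlapping : (List (String × List Int)) := [("a", [1, 2]), ("b", [2])]
def Spec_non_overlapping (dataset2ids : List (String × List Int)) (out : List (String × List (Int × Int))) : Prop := out = non_overlapping_alt dataset2ids
instance (dataset2ids : List (String × List Int)) (out : List (String × List (Int × Int))) : Decidable (Spec_non_overlapping dataset2ids out) := by unfold Spec_non_overlapping; infer_instance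

-- ===== CLAIM (what is proved, stated in full; the proofs are below) =====
def Claim_equal_non_overlapping : Prop := ∀ (dataset2ids : List (String × List Int)), Dom_non_overlapping dataset2ids → Pre_non_overlapping dataset2ids → Spec_non_overlapping dataset2ids (non_overlapping dataset2ids)

-- ===== LEMMAS AND PROOFS =====

-- reference shape: per-dataset enumerate-dict items, offsets threaded explicitly
def pvRef (off : Int) : List (String × List Int) → List (String × List (Int × Int))
  | [] => []
  | p :: rest =>
      (p.1, ((PySem.List.enumerate p.2 off).foldl
          (fun (m : PySem.Dict Int Int) iv => m.insert iv.2 iv.1) PySem.Dict.empty).items)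
        :: pvRef (off + p.2.length) rest

-- the offset list B builds, as a structural function
def pvOffs (t : Int) : List (String × List Int) → List Int
  | [] => []
  | p :: rest => t :: pvOffs (t + p.2.length) rest

lemma inner_eq (ids : List Int) : ∀ (pool : List Int) (m : PySem.Dict Int Int),
    ids.foldl (fun (q : List Int × PySem.Dict Int Int) identity =>
        (q.1 ++ [identity], q.2.insert identity ((q.1.length : Int)))) (pool, m)
      = (pool ++ ids,
         (PySem.List.enumerate ids (pool.length : Int)).foldl
           (fun (m : PySem.Dict Int Int) iv => m.insert iv.2 iv.1) m) := by
  induction ids with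
  | nil => intro pool m; simp [PySem.List.enumerate_nil]
  | cons x t ih =>
      intro pool m
      simp only [List.foldl_cons, PySem.List.enumerate_cons]
      rw [ih (pool ++ [x])]
      simp [List.append_assoc]

lemma A_eq_ref (l : List (String × List Int)) :
    ∀ (pool : List Int) (dAcc : PySem.Dict String (PySem.Dict Int Int)),
    (∀ p ∈ l, dAcc.contains p.1 = false) → (l.map Prod.fst).Nodup →
    ((l.foldl
        (fun (st : List Int × PySem.Dict String (PySem.Dict Int Int)) p =>
          let q := p.2.foldl
            (fun (q : List Int × PySem.Dict Int Int) identity =>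
              (q.1 ++ [identity], q.2.insert identity ((q.1.length : Int))))
            (st.1, PySem.Dict.empty)
          (q.1, st.2.insert p.1 q.2))
        (pool, dAcc)).2).items.map (fun p => (p.1, p.2.items))
      = dAcc.items.map (fun p => (p.1, p.2.items)) ++ pvRef ((pool.length : Int)) l := by
  induction l with
  | nil => intro pool dAcc _ _; simp [pvRef]
  | cons hd tl ih =>
      intro pool dAcc hfresh hnd
      simp only [List.foldl_cons]
      rw [inner_eq]
      have hhd : dAcc.contains hd.1 = false := hfresh hd (by simp)
      have hfresh' : ∀ p ∈ tl, (dAcc.insert hd.1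
          ((PySem.List.enumerate hd.2 (pool.length : Int)).foldl
            (fun (m : PySem.Dict Int Int) iv => m.insert iv.2 iv.1) PySem.Dict.empty)).contains p.1 = false := by
        intro p hp
        rw [PySem.Dict.contains_insert]
        have hne : p.1 ≠ hd.1 := by
          simp only [List.map_cons, List.nodup_cons] at hnd
          intro h; exact hnd.1 (h ▸ List.mem_map_of_mem hp)
        simp [hne, hfresh p (List.mem_cons_of_mem _ hp)]
      have hnd' : (tl.map Prod.fst).Nodup := by
        simp only [List.map_cons, List.nodup_cons] at hnd; exact hnd.2
      rw [ih _ _ hfresh' hnd']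
      rw [PySem.Dict.items_insert_of_not_contains (h := hhd)]
      simp [pvRef, List.append_assoc]

lemma offs_eq (l : List (String × List Int)) : ∀ (acc : List Int) (t : Int),
    (l.foldl (fun (st : List Int × Int) p => (st.1 ++ [st.2], st.2 + (p.2.length : Int))) (acc, t)).1
      = acc ++ pvOffs t l := by
  induction l with
  | nil => intro acc t; simp [pvOffs]
  | cons hd tl ih =>
      intro acc t
      simp only [List.foldl_cons]
      rw [ih]
      simp [pvOffs, List.append_assoc]

lemma B_eq_ref (l : List (String × List Int)) : ∀ (t : Int),
    (l.zip (pvOffs t l)).map (fun q =>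
      (q.1.1, ((PySem.List.enumerate q.1.2 q.2).foldl
          (fun (m : PySem.Dict Int Int) iv => m.insert iv.2 iv.1) PySem.Dict.empty).items))
      = pvRef t l := by
  induction l with
  | nil => intro t; simp [pvOffs, pvRef]
  | cons hd tl ih =>
      intro t
      simp only [pvOffs, pvRef, List.zip_cons_cons, List.map_cons, ih]

-- ===== VERDICT (by name: the statement is the Claim_ definition above) =====
theorem non_overlapping_spec : Claim_equal_non_overlapping := by
  intro d2i _ hpre
  unfold Spec_non_overlapping non_overlapping non_overlapping_alt
  rw [offs_eq, List.nil_append, B_eq_ref]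
  have := A_eq_ref d2i [] PySem.Dict.empty (by intro p _; simp) hpre
  simpa using this
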